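-- pv_equiv track=rewrite | github.com/benrap/Assembly2Brainfuck | converters/HBF2BF.py | advance_behind_flag_brainfuck
-- ===== SOURCE A (Python) =====
-- def advance_behind_flag_brainfuck(code, n, m):
-- 	parts = code.split("(advance_behind_flag")
-- 	new_code = parts[0]
-- 	for part in parts[1:]:
-- 		sub_parts = part.split(")")
-- 		rest = ")".join(sub_parts[1:])
-- 		num = sub_parts[0]
-- 		'''new_code += "(save_all)(on_flag1)(go_back_to_flag" + num + ")(save_all)(goto_flag1)" + \
-- 					"(copy_behind_to_flag" + num + ")(go_back_to_flag" + num + ")(load_to_flag1)" + \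
-- 					"(advance_flag" + num + ")(on_flag2)(goto_flag1)(copy_behind_to_flag2)(go_back_to_flag2)(off_flag2)" + \
-- 					"(goto_flag1)(off_flag1)(load_all)" + '''
-- 		new_code += "(save_all)(on_flag1)(go_back_to_flag" + num + ")(save_all)(goto_flag1)" + \
-- 		            "(copy_behind_to_flag" + num + ")(go_back_to_flag" + num + ")(load_to_flag1)" + \
-- 		            "(advance_flag" + num + ")(on_flag2)(save_all)(goto_flag1)(copy_behind_to_flag2)(go_back_to_flag2)(off_flag2)" + \
-- 		            "(load_to_flag1)(goto_flag1)(off_flag1)" + \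
-- 		            rest
-- 	return new_code
-- ===== SOURCE B (Python) =====
-- M = "(advance_behind_flag"
--
-- def _exp(num):
--     return ("(save_all)(on_flag1)(go_back_to_flag" + num + ")(save_all)(goto_flag1)(copy_behind_to_flag"
--             + num + ")(go_back_to_flag" + num + ")(load_to_flag1)(advance_flag" + num
--             + ")(on_flag2)(save_all)(goto_flag1)(copy_behind_to_flag2)(go_back_to_flag2)(off_flag2)(load_to_flag1)(goto_flag1)(off_flag1)")
--
-- def advance_behind_flag_brainfuck(code, n, m):
--     # single left-to-right state-machine pass: outside a macro copy chars;
--     # after the macro marker collect the num token until ')' (consumed), a new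
--     # marker, or end of string, then emit the expansion.
--     out = []
--     num = None        # None = outside a macro, list of chars = collecting num
--     i = 0
--     L = len(code)
--     while i < L:
--         if code.startswith(M, i):
--             if num is not None:
--                 out.append(_exp("".join(num)))
--             num = []
--             i += len(M)
--         elif num is not None:
--             if code[i] == ")":
--                 out.append(_exp("".join(num)))
--                 num = None
--             else:
--                 num.append(code[i])
--             i += 1
--         else:
--             out.append(code[i])
--             i += 1
--     if num is not None:
--         out.append(_exp("".join(num)))
--     return "".join(out)
-- ===== Notes on version B (the rewrite author's own statement) =====
-- stated objective: alternative
-- what changed: Replaces A's split-on-marker / split-on-')' / join token reassembly with a single left-to-right state-machine scan that copies characters and expands each macro (marker, num token, optional ')') as it is encountered.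
import Mathlib
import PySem

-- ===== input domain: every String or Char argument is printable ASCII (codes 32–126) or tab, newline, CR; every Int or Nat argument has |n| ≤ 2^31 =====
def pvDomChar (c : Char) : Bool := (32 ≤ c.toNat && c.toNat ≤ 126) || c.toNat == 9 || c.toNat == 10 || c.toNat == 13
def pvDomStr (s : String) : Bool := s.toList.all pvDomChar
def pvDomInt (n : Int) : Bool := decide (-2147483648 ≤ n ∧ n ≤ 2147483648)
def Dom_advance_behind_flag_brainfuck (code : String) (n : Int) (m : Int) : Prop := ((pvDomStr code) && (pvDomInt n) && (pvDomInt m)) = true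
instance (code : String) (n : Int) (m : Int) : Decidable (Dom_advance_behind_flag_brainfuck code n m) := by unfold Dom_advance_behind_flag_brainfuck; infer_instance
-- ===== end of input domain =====

-- B replaces A's split/split/join token reassembly by a single left-to-right
-- state-machine scan (objective: alternative, same linear cost).

-- ===== PORT A =====
-- literal transliteration of A: split on the macro marker, then for each part
-- split on ")" to take the num token and re-join the rest, accumulating into
-- new_code (strings handled on the List Char side, wrapped by String.ofList).
def advance_behind_flag_brainfuck (code : String) (n : Int) (m : Int) : String :=
  let parts := PySem.Chars.splitOn code.toList "(advance_behind_flag".toList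
  let new0 := parts.headD []
  String.ofList (parts.tail.foldl (fun new_code part =>
    let sub_parts := PySem.Chars.splitOn part ")".toList
    let rest := PySem.Chars.join ")".toList sub_parts.tail
    let num := sub_parts.headD []
    new_code ++ "(save_all)(on_flag1)(go_back_to_flag".toList ++ num
      ++ ")(save_all)(goto_flag1)(copy_behind_to_flag".toList ++ num
      ++ ")(go_back_to_flag".toList ++ num
      ++ ")(load_to_flag1)(advance_flag".toList ++ num
      ++ ")(on_flag2)(save_all)(goto_flag1)(copy_behind_to_flag2)(go_back_to_flag2)(off_flag2)(load_to_flag1)(goto_flag1)(off_flag1)".toList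
      ++ rest) new0)

-- ===== PORT B =====
-- _exp of Source B
def pvExp (num : List Char) : List Char :=
  "(save_all)(on_flag1)(go_back_to_flag".toList ++ num
    ++ ")(save_all)(goto_flag1)(copy_behind_to_flag".toList ++ num
    ++ ")(go_back_to_flag".toList ++ num
    ++ ")(load_to_flag1)(advance_flag".toList ++ num
    ++ ")(on_flag2)(save_all)(goto_flag1)(copy_behind_to_flag2)(go_back_to_flag2)(off_flag2)(load_to_flag1)(goto_flag1)(off_flag1)".toList

-- Source B's while loop over index i, ported as recursion over the suffix of the
-- code (state: `none` = outside a macro, `some num` = collecting num; `out` is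
-- the output accumulator); exact step for step.
def pvScan : List Char → Option (List Char) → List Char → List Char
  | [], none, out => out
  | [], some num, out => out ++ pvExp num
  | c :: rest, st, out =>
    if "(advance_behind_flag".toList.isPrefixOf (c :: rest) then
      pvScan ((c :: rest).drop "(advance_behind_flag".toList.length) (some [])
        (match st with | none => out | some num => out ++ pvExp num)
    else
      match st with
      | some num =>
        if c = ')' then pvScan rest none (out ++ pvExp num)
        else pvScan rest (some (num ++ [c])) out
      | none => pvScan rest none (out ++ [c])
termination_by l _ _ => l.length
decreasing_by
  · simp only [List.length_drop, List.length_cons]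
    have : ("(advance_behind_flag".toList).length = 20 := rfl
    omega
  · simp
  · simp
  · simp

def advance_behind_flag_brainfuck_alt (code : String) (n : Int) (m : Int) : String :=
  String.ofList (pvScan code.toList none [])

-- ===== PRECONDITION & SPEC =====
def Spec_advance_behind_flag_brainfuck (code : String) (n : Int) (m : Int) (out : String) : Prop := out = advance_behind_flag_brainfuck_alt code n m
instance (code : String) (n : Int) (m : Int) (out : String) : Decidable (Spec_advance_behind_flag_brainfuck code n m out) := by unfold Spec_advance_behind_flag_brainfuck; infer_instance

-- ===== CLAIM (what is proved, stated in full; the proofs are below) =====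
def Claim_equal_advance_behind_flag_brainfuck : Prop := ∀ (code : String) (n : Int) (m : Int), Dom_advance_behind_flag_brainfuck code n m → Spec_advance_behind_flag_brainfuck code n m (advance_behind_flag_brainfuck code n m)

-- ===== LEMMAS AND PROOFS =====

-- reference characterisation of PySem.Chars.splitOn (recursion on the string)
def fsplit (sep : List Char) (l : List Char) : List (List Char) :=
    if h : sep ≠ [] ∧ sep.isPrefixOf l then
      [] :: fsplit sep (l.drop sep.length)
    else
      match l with
      | [] => [[]]
      | c :: r => (fsplit sep r).modifyHead (c :: ·)
termination_by l.length
decreasing_by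
  · have h1 := (List.isPrefixOf_iff_prefix.mp h.2).length_le
    have h2 : 0 < sep.length := List.length_pos_iff.mpr h.1
    simp only [List.length_drop]; omega
  · simp

lemma fsplit_pos (sep l : List Char) (h1 : sep ≠ []) (h2 : sep.isPrefixOf l) :
    fsplit sep l = [] :: fsplit sep (l.drop sep.length) := by
  rw [fsplit]; simp [h1, h2]

lemma fsplit_nil (sep : List Char) (h1 : sep ≠ []) : fsplit sep [] = [[]] := by
  rw [fsplit]
  have : ¬ sep.isPrefixOf ([] : List Char) := by
    cases sep with
    | nil => simp at h1
    | cons a as => simp [List.isPrefixOf]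
  simp [this]

lemma fsplit_cons (sep : List Char) (c : Char) (r : List Char)
    (h2 : ¬ sep.isPrefixOf (c :: r)) :
    fsplit sep (c :: r) = (fsplit sep r).modifyHead (c :: ·) := by
  rw [fsplit]; simp [h2]

lemma fsplit_ne_nil (sep : List Char) (h1 : sep ≠ []) : ∀ l, fsplit sep l ≠ [] := by
  have main : ∀ n (l : List Char), l.length ≤ n → fsplit sep l ≠ [] := by
    intro n
    induction n with
    | zero =>
      intro l hl
      have : l = [] := by cases l <;> simp_all
      subst this; rw [fsplit_nil sep h1]; simp
    | succ n ih =>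
      intro l hl
      by_cases hp : sep.isPrefixOf l
      · rw [fsplit_pos sep l h1 hp]; simp
      · cases l with
        | nil => rw [fsplit_nil sep h1]; simp
        | cons c r =>
          rw [fsplit_cons sep c r hp]
          have := ih r (by simp at hl; omega)
          cases hfs : fsplit sep r with
          | nil => exact absurd hfs this
          | cons a as => simp [List.modifyHead]
  intro l; exact main l.length l le_rfl

lemma go_eq_fsplit (sep : List Char) (h1 : sep ≠ []) :
    ∀ fuel l cur acc, l.length < fuel →
      PySem.Chars.splitOn.go sep fuel l cur acc
        = acc.reverse ++ (fsplit sep l).modifyHead (cur.reverse ++ ·) := by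
  intro fuel
  induction fuel with
  | zero => intro l cur acc h; omega
  | succ n ih =>
    intro l cur acc h
    cases l with
    | nil =>
      simp only [PySem.Chars.splitOn.go]
      rw [fsplit_nil sep h1]
      simp [List.modifyHead]
    | cons c r =>
      by_cases hp : sep.isPrefixOf (c :: r)
      · have hgo : PySem.Chars.splitOn.go sep (n + 1) (c :: r) cur acc
            = PySem.Chars.splitOn.go sep n ((c :: r).drop sep.length) [] (cur.reverse :: acc) := by
          simp only [PySem.Chars.splitOn.go, hp, if_true]
        rw [hgo]
        have hlen : ((c :: r).drop sep.length).length < n := by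
          have hle := (List.isPrefixOf_iff_prefix.mp hp).length_le
          have hpos : 0 < sep.length := List.length_pos_iff.mpr h1
          simp only [List.length_drop, List.length_cons] at *
          omega
        rw [ih _ _ _ hlen, fsplit_pos sep (c :: r) h1 hp]
        cases fsplit sep ((c :: r).drop sep.length) <;> simp [List.modifyHead]
      · have hgo : PySem.Chars.splitOn.go sep (n + 1) (c :: r) cur acc
            = PySem.Chars.splitOn.go sep n r (c :: cur) acc := by
          simp only [PySem.Chars.splitOn.go]
          rw [if_neg (by simp [hp])]
        rw [hgo]
        have hlen : r.length < n := by simp at h; omega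
        rw [ih _ _ _ hlen, fsplit_cons sep c r hp]
        cases hfs : fsplit sep r with
        | nil => exact absurd hfs (fsplit_ne_nil sep h1 r)
        | cons a as => simp [List.modifyHead]

lemma splitOn_eq_fsplit (sep l : List Char) (h1 : sep ≠ []) :
    PySem.Chars.splitOn l sep = fsplit sep l := by
  unfold PySem.Chars.splitOn
  rw [go_eq_fsplit sep h1 _ _ _ _ (by omega)]
  cases hfs : fsplit sep l with
  | nil => exact absurd hfs (fsplit_ne_nil sep h1 l)
  | cons a as => simp [List.modifyHead]

lemma join_fsplit (sep : List Char) (h1 : sep ≠ []) :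
    ∀ l, PySem.Chars.join sep (fsplit sep l) = l := by
  have main : ∀ n (l : List Char), l.length ≤ n → PySem.Chars.join sep (fsplit sep l) = l := by
    intro n
    induction n with
    | zero =>
      intro l hl
      have : l = [] := by cases l <;> simp_all
      subst this
      rw [fsplit_nil sep h1]
      simp [PySem.Chars.join, List.intercalate]
    | succ n ih =>
      intro l hl
      by_cases hp : sep.isPrefixOf l
      · rw [fsplit_pos sep l h1 hp]
        obtain ⟨t, rfl⟩ : ∃ t, sep ++ t = l := by
          obtain ⟨t, ht⟩ := List.isPrefixOf_iff_prefix.mp hp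
          exact ⟨t, ht⟩
        have hdrop : (sep ++ t).drop sep.length = t := by simp
        rw [hdrop]
        have hlent : t.length ≤ n := by
          have hpos : 0 < sep.length := List.length_pos_iff.mpr h1
          simp only [List.length_append] at hl; omega
        have iht := ih t hlent
        cases hfs : fsplit sep t with
        | nil => exact absurd hfs (fsplit_ne_nil sep h1 t)
        | cons a as =>
          rw [hfs] at iht
          rw [PySem.Chars.join_cons_cons]
          simpa using congrArg (sep ++ ·) iht
      · cases l with
        | nil => rw [fsplit_nil sep h1]; simp [PySem.Chars.join, List.intercalate]
        | cons c r =>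
          rw [fsplit_cons sep c r hp]
          have hlr : r.length ≤ n := by simp at hl; omega
          have ihr := ih r hlr
          cases hfs : fsplit sep r with
          | nil => exact absurd hfs (fsplit_ne_nil sep h1 r)
          | cons a as =>
            rw [hfs] at ihr
            cases as with
            | nil =>
              simp only [List.modifyHead]
              simp [PySem.Chars.join, List.intercalate] at ihr ⊢
              simp [ihr]
            | cons b bs =>
              simp only [List.modifyHead]
              rw [PySem.Chars.join_cons_cons] at ihr ⊢
              simp [← ihr]
  intro l; exact main l.length l le_rfl

-- A's per-part step, num and rest extraction
def stepA : List Char → List Char → List Char := fun new_code part =>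
  let sub_parts := PySem.Chars.splitOn part ")".toList
  let rest := PySem.Chars.join ")".toList sub_parts.tail
  let num := sub_parts.headD []
  new_code ++ "(save_all)(on_flag1)(go_back_to_flag".toList ++ num
    ++ ")(save_all)(goto_flag1)(copy_behind_to_flag".toList ++ num
    ++ ")(go_back_to_flag".toList ++ num
    ++ ")(load_to_flag1)(advance_flag".toList ++ num
    ++ ")(on_flag2)(save_all)(goto_flag1)(copy_behind_to_flag2)(go_back_to_flag2)(off_flag2)(load_to_flag1)(goto_flag1)(off_flag1)".toList
    ++ rest

def qnum (p : List Char) : List Char := (fsplit [')'] p).headD []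
def qrest (p : List Char) : List Char := PySem.Chars.join [')'] (fsplit [')'] p).tail
def gA (parts : List (List Char)) : List Char := parts.foldl stepA []

lemma rparen_toList : ")".toList = [')'] := rfl

lemma stepA_eq (nc p : List Char) : stepA nc p = nc ++ pvExp (qnum p) ++ qrest p := by
  simp only [stepA, pvExp, qnum, qrest, rparen_toList,
    splitOn_eq_fsplit [')'] p (by simp), List.append_assoc]

lemma foldl_stepA_init (parts : List (List Char)) :
    ∀ init, parts.foldl stepA init = init ++ gA parts := by
  induction parts with
  | nil => intro init; simp [gA]
  | cons p ps ih =>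
    intro init
    simp only [gA, List.foldl_cons] at *
    rw [ih (stepA init p), ih (stepA [] p), stepA_eq, stepA_eq]
    simp [List.append_assoc]

lemma qnum_nil : qnum [] = [] := by
  simp [qnum, fsplit_nil [')'] (by simp)]

lemma qnum_rparen (p : List Char) : qnum (')' :: p) = [] := by
  have hp : List.isPrefixOf [')'] (')' :: p) = true := by simp [List.isPrefixOf]
  simp [qnum, fsplit_pos [')'] (')' :: p) (by simp) hp]

lemma qnum_cons (c : Char) (p : List Char) (hc : c ≠ ')') : qnum (c :: p) = c :: qnum p := by
  have hp : ¬ List.isPrefixOf [')'] (c :: p) = true := by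
    simp [List.isPrefixOf]
    intro h; exact hc h.symm
  rw [qnum, fsplit_cons [')'] c p hp]
  cases hfs : fsplit [')'] p with
  | nil => exact absurd hfs (fsplit_ne_nil [')'] (by simp) p)
  | cons a as => simp [qnum, hfs, List.modifyHead]

lemma qrest_nil : qrest [] = [] := by
  simp [qrest, fsplit_nil [')'] (by simp), PySem.Chars.join, List.intercalate]

lemma qrest_rparen (p : List Char) : qrest (')' :: p) = p := by
  have hp : List.isPrefixOf [')'] (')' :: p) = true := by simp [List.isPrefixOf]
  rw [qrest, fsplit_pos [')'] (')' :: p) (by simp) hp]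
  simp [join_fsplit [')'] (by simp) p]

lemma qrest_cons (c : Char) (p : List Char) (hc : c ≠ ')') : qrest (c :: p) = qrest p := by
  have hp : ¬ List.isPrefixOf [')'] (c :: p) = true := by
    simp [List.isPrefixOf]
    intro h; exact hc h.symm
  rw [qrest, fsplit_cons [')'] c p hp]
  cases hfs : fsplit [')'] p with
  | nil => exact absurd hfs (fsplit_ne_nil [')'] (by simp) p)
  | cons a as => simp [qrest, hfs, List.modifyHead]

lemma marker_ne_nil : "(advance_behind_flag".toList ≠ [] := by decide

-- the central invariant: the scanner of B computes exactly A's split/fold value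
lemma scan_eq_main : ∀ (k : Nat) (s : List Char), s.length ≤ k →
    (∀ out, pvScan s none out
        = out ++ (fsplit "(advance_behind_flag".toList s).headD []
             ++ gA (fsplit "(advance_behind_flag".toList s).tail) ∧
    (∀ num out, pvScan s (some num) out
        = out ++ pvExp (num ++ qnum ((fsplit "(advance_behind_flag".toList s).headD []))
             ++ qrest ((fsplit "(advance_behind_flag".toList s).headD [])
             ++ gA (fsplit "(advance_behind_flag".toList s).tail) := by
  intro k
  induction k with
  | zero =>
    intro s hs
    have : s = [] := by cases s <;> simp_all
    subst this
    rw [fsplit_nil _ marker_ne_nil]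
    constructor
    · intro out; simp [pvScan, gA]
    · intro num out; simp [pvScan, gA, qnum_nil, qrest_nil]
  | succ k ih =>
    intro s hs
    cases s with
    | nil =>
      rw [fsplit_nil _ marker_ne_nil]
      constructor
      · intro out; simp [pvScan, gA]
      · intro num out; simp [pvScan, gA, qnum_nil, qrest_nil]
    | cons c r =>
      by_cases hp : "(advance_behind_flag".toList.isPrefixOf (c :: r)
      · -- marker found: consume it, start collecting num
        have hlen : ((c :: r).drop "(advance_behind_flag".toList.length).length ≤ k := by
          have hle := (List.isPrefixOf_iff_prefix.mp hp).length_le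
          have hpos : 0 < ("(advance_behind_flag".toList).length := by decide
          simp only [List.length_drop, List.length_cons] at *
          omega
        have ihd := ih _ hlen
        rw [fsplit_pos _ (c :: r) marker_ne_nil hp]
        set s' := (c :: r).drop "(advance_behind_flag".toList.length with hs'
        cases hfs : fsplit "(advance_behind_flag".toList s' with
        | nil => exact absurd hfs (fsplit_ne_nil _ marker_ne_nil s')
        | cons p' ps' =>
          have hg : gA (p' :: ps') = pvExp (qnum p') ++ qrest p' ++ gA ps' := by
            simp only [gA, List.foldl_cons]
            rw [foldl_stepA_init ps' (stepA [] p'), stepA_eq]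
            simp [gA, List.append_assoc]
          constructor
          · intro out
            have hstep : pvScan (c :: r) none out = pvScan s' (some []) out := by
              rw [pvScan, if_pos hp]
            rw [hstep, (ihd.2) [] out, hfs]
            simp [hg, List.append_assoc]
          · intro num out
            have hstep : pvScan (c :: r) (some num) out = pvScan s' (some []) (out ++ pvExp num) := by
              rw [pvScan, if_pos hp]
            rw [hstep, (ihd.2) [] (out ++ pvExp num), hfs]
            simp [hg, qnum_nil, qrest_nil, List.append_assoc]
      · -- no marker here
        have hlen : r.length ≤ k := by simp at hs; omega
        have ihd := ih r hlen
        rw [fsplit_cons _ c r hp]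
        cases hfs : fsplit "(advance_behind_flag".toList r with
        | nil => exact absurd hfs (fsplit_ne_nil _ marker_ne_nil r)
        | cons p ps =>
          constructor
          · intro out
            have hstep : pvScan (c :: r) none out = pvScan r none (out ++ [c]) := by
              rw [pvScan, if_neg hp]
            rw [hstep, ihd.1 (out ++ [c]), hfs]
            simp [List.modifyHead, List.append_assoc]
          · intro num out
            by_cases hc : c = ')'
            · subst hc
              have hstep : pvScan (')' :: r) (some num) out = pvScan r none (out ++ pvExp num) := by
                rw [pvScan, if_neg hp, if_pos rfl]
              rw [hstep, ihd.1 (out ++ pvExp num), hfs]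
              simp [List.modifyHead, qnum_rparen, qrest_rparen, List.append_assoc]
            · have hstep : pvScan (c :: r) (some num) out = pvScan r (some (num ++ [c])) out := by
                rw [pvScan, if_neg hp, if_neg hc]
              rw [hstep, ihd.2 (num ++ [c]) out, hfs]
              simp [List.modifyHead, qnum_cons c _ hc, qrest_cons c _ hc, List.append_assoc]

-- ===== VERDICT (by name: the statement is the Claim_ definition above) =====
theorem advance_behind_flag_brainfuck_spec : Claim_equal_advance_behind_flag_brainfuck := by
  intro code n m _
  show advance_behind_flag_brainfuck code n m = advance_behind_flag_brainfuck_alt code n m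
  simp only [advance_behind_flag_brainfuck, advance_behind_flag_brainfuck_alt]
  rw [splitOn_eq_fsplit _ _ marker_ne_nil]
  show String.ofList (((fsplit "(advance_behind_flag".toList code.toList).tail).foldl stepA
      ((fsplit "(advance_behind_flag".toList code.toList).headD [])) = _
  rw [foldl_stepA_init, (scan_eq_main code.toList.length code.toList le_rfl).1 []]
  simp [gA]
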